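-- pv_equiv track=rewrite | github.com/Hamcastle/Neural-Pokemon-Evolution | funs/name_seq_translation.py | create_start_end_seqs
-- ===== SOURCE A (Python) =====
-- def create_start_end_seqs(lines,num_samples=406):
-- 	try:
-- 		input_texts  = []
-- 		target_texts = []
-- 		input_characters  = set()
-- 		target_characters = set()
--
-- 		for line in lines[: min(num_samples, len(lines) - 1)]:
-- 			input_text, target_text = line.split('\t')
-- 			target_text = '\t' + target_text + '\n'
-- 			input_texts.append(input_text)
-- 			target_texts.append(target_text)
--
-- 			for char in input_text:
-- 				if char not in input_characters:
-- 					input_characters.add(char)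
-- 			for char in target_text:
-- 				if char not in target_characters:
-- 					target_characters.add(char)
--
-- 		return input_texts,target_texts,input_characters,target_characters
-- 	except:
-- 		raise
-- ===== SOURCE B (Python) =====
-- def create_start_end_seqs(lines, num_samples=406):
--     return _seqs(lines[: min(num_samples, len(lines) - 1)])
--
-- def _seqs(chunk):
--     # Divide and conquer: solve each half independently, then merge by
--     # list concatenation and set union.
--     n = len(chunk)
--     if n == 0:
--         return [], [], set(), set()
--     if n == 1:
--         input_text, target_text = chunk[0].split('\t')
--         target_text = '\t' + target_text + '\n'
--         return [input_text], [target_text], set(input_text), set(target_text)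
--     left = _seqs(chunk[: n // 2])
--     right = _seqs(chunk[n // 2:])
--     return (left[0] + right[0], left[1] + right[1],
--             left[2] | right[2], left[3] | right[3])
-- ===== Notes on version B (the rewrite author's own statement) =====
-- stated objective: alternative
-- what changed: Replaces A's single fused left-to-right loop (appending to four accumulators with explicit per-character membership-tested set insertion) by a divide-and-conquer recursion: each half of the sliced lines is solved independently and the results merged by list concatenation and set union.
import Mathlib
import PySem

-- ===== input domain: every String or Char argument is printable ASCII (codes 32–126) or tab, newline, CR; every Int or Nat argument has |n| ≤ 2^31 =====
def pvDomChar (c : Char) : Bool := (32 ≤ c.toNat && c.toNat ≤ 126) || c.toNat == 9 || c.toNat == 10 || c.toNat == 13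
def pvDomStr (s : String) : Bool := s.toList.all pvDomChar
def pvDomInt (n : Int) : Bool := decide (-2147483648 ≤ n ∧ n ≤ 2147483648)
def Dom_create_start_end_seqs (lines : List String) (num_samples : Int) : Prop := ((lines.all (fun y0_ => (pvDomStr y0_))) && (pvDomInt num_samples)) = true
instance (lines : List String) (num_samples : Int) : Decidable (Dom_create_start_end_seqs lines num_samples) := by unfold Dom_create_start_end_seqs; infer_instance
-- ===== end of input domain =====

-- B replaces A's fused left-to-right loop by a divide-and-conquer recursion on the sliced
-- lines, merging half-results with list concatenation and set union; objective: alternative.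

-- ===== PORT A =====
-- 'for char in text: if char not in s: s.add(char)' — iteration yields 1-char strings
def pvCharLoop (s : PySem.Set String) (text : String) : PySem.Set String :=
  (text.toList.map (fun c => String.mk [c])).foldl
    (fun acc ch => if acc.contains ch then acc else PySem.Set.add acc ch) s

-- the body of A's per-line loop over its 4-component state
def pvAStep (st : List String × List String × PySem.Set String × PySem.Set String)
    (line : String) : List String × List String × PySem.Set String × PySem.Set String :=
  match PySem.Str.split? line "\t" with
  | some [input_text, tt] =>
    let target_text := "\t" ++ tt ++ "\n"
    (st.1 ++ [input_text], st.2.1 ++ [target_text],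
     pvCharLoop st.2.2.1 input_text, pvCharLoop st.2.2.2 target_text)
  | _ => st   -- unreachable under Pre_ (Python raises ValueError on unpacking)

def create_start_end_seqs (lines : List String) (num_samples : Int) :
    List String × List String × List String × List String :=
  let sliced := PySem.List.slice lines none (some (min num_samples ((lines.length : Int) - 1)))
  sliced.foldl pvAStep ([], [], [], [])

-- ===== PORT B =====
-- _seqs: divide and conquer over the sliced lines
def pvSeqs (chunk : List String) : List String × List String × List String × List String :=
  match chunk with
  | [] => ([], [], [], [])
  | [l] =>
    match PySem.Str.split? l "\t" with
    | some [input_text, tt] =>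
      let target_text := "\t" ++ tt ++ "\n"
      ([input_text], [target_text],
       PySem.Set.ofList (input_text.toList.map (fun c => String.mk [c])),
       PySem.Set.ofList (target_text.toList.map (fun c => String.mk [c])))
    | _ => ([], [], [], [])   -- unreachable under Pre_ (Python raises ValueError on unpacking)
  | a :: b :: rest =>
    let chunk := a :: b :: rest
    let k := chunk.length / 2
    let L := pvSeqs (chunk.take k)
    let R := pvSeqs (chunk.drop k)
    (L.1 ++ R.1, L.2.1 ++ R.2.1,
     PySem.Set.union L.2.2.1 R.2.2.1, PySem.Set.union L.2.2.2 R.2.2.2)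
termination_by chunk.length
decreasing_by
  · simp [List.length_take]; omega
  · simp [List.length_drop]; omega

def create_start_end_seqs_alt (lines : List String) (num_samples : Int) :
    List String × List String × List String × List String :=
  pvSeqs (PySem.List.slice lines none (some (min num_samples ((lines.length : Int) - 1))))

-- ===== PRECONDITION & SPEC =====
-- Pre_ excludes exactly the inputs where Python A raises ValueError: a line inside the
-- slice whose split('\t') does not have exactly 2 parts (unpacking fails).
def Pre_create_start_end_seqs (lines : List String) (num_samples : Int) : Prop :=
  ∀ line ∈ PySem.List.slice lines none (some (min num_samples ((lines.length : Int) - 1))),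
    ((PySem.Str.split? line "\t").getD []).length = 2
instance (lines : List String) (num_samples : Int) : Decidable (Pre_create_start_end_seqs lines num_samples) := by unfold Pre_create_start_end_seqs; infer_instance

def pvWitness_create_start_end_seqs : List String × Int := (["ab\tcd", "e\tf", "zz"], 2)

def Spec_create_start_end_seqs (lines : List String) (num_samples : Int) (out : List String × List String × List String × List String) : Prop := out = create_start_end_seqs_alt lines num_samples
instance (lines : List String) (num_samples : Int) (out : List String × List String × List String × List String) : Decidable (Spec_create_start_end_seqs lines num_samples out) := by unfold Spec_create_start_end_seqs; infer_instance

-- ===== CLAIM (what is proved, stated in full; the proofs are below) =====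
def Claim_equal_create_start_end_seqs : Prop := ∀ (lines : List String) (num_samples : Int), Dom_create_start_end_seqs lines num_samples → Pre_create_start_end_seqs lines num_samples → Spec_create_start_end_seqs lines num_samples (create_start_end_seqs lines num_samples)

-- ===== LEMMAS AND PROOFS =====

-- canonical description of the result on a list of 2-part lines
def pvIn (l : String) : String := ((PySem.Str.split? l "\t").getD []).getD 0 ""
def pvTar (l : String) : String := "\t" ++ ((PySem.Str.split? l "\t").getD []).getD 1 "" ++ "\n"
def pvChars (texts : List String) : List String :=
  texts.flatMap (fun t => t.toList.map (fun c => String.mk [c]))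

lemma pvChars_append (xs ys : List String) :
    pvChars (xs ++ ys) = pvChars xs ++ pvChars ys := by
  simp [pvChars]

lemma update_ofList (s : PySem.Set String) (xs : List String) :
    PySem.Set.update s (PySem.Set.ofList xs) = PySem.Set.update s xs := by
  rw [PySem.Set.update_eq_append_filter, PySem.Set.update_eq_append_filter,
    PySem.Set.ofList_ofList]

lemma union_ofList_ofList (a b : List String) :
    PySem.Set.union (PySem.Set.ofList a) (PySem.Set.ofList b) =
      PySem.Set.ofList (a ++ b) := by
  rw [PySem.Set.ofList_append, PySem.Set.union, update_ofList]

-- A's guarded insertion loop is exactly Set.update with the same character list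
lemma pvCharLoop_eq (s : PySem.Set String) (t : String) :
    pvCharLoop s t = PySem.Set.update s (t.toList.map (fun c => String.mk [c])) := by
  unfold pvCharLoop
  generalize t.toList.map (fun c => String.mk [c]) = l
  induction l generalizing s with
  | nil => simp [PySem.Set.update_nil]
  | cons x xs ih =>
    rw [PySem.Set.update_cons, List.foldl_cons, ← ih]
    by_cases h : PySem.Set.contains s x <;> simp [PySem.Set.add, PySem.Set.contains] at h ⊢ <;> simp [h]

lemma split_two (l : String) (h : ((PySem.Str.split? l "\t").getD []).length = 2) :
    ∃ i t, PySem.Str.split? l "\t" = some [i, t] ∧ pvIn l = i ∧ pvTar l = "\t" ++ t ++ "\n" := by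
  have : ∃ xs, PySem.Str.split? l "\t" = some xs := by
    simp only [PySem.Str.split?, Option.map_eq_some_iff]
    simp [PySem.Chars.split?]
  obtain ⟨xs, hxs⟩ := this
  have hx2 : xs.length = 2 := by simpa [hxs] using h
  match xs, hx2 with
  | [i, t], _ => exact ⟨i, t, hxs, by simp [pvIn, hxs], by simp [pvTar, hxs]⟩

-- A's fold with a generalized accumulator
lemma pv_fold_A (L : List String)
    (h : ∀ line ∈ L, ((PySem.Str.split? line "\t").getD []).length = 2)
    (a b : List String) (S1 S2 : PySem.Set String) :
    L.foldl pvAStep (a, b, S1, S2) =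
      (a ++ L.map pvIn, b ++ L.map pvTar,
       PySem.Set.update S1 (pvChars (L.map pvIn)),
       PySem.Set.update S2 (pvChars (L.map pvTar))) := by
  induction L generalizing a b S1 S2 with
  | nil => simp [pvChars, PySem.Set.update_nil]
  | cons l rest ih =>
    obtain ⟨i, t, hxs, hi, ht⟩ := split_two l (h l (by simp))
    have hrest : ∀ line ∈ rest, ((PySem.Str.split? line "\t").getD []).length = 2 :=
      fun line hm => h line (by simp [hm])
    rw [List.foldl_cons]
    show List.foldl pvAStep (pvAStep (a, b, S1, S2) l) rest = _
    rw [show pvAStep (a, b, S1, S2) l =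
        (a ++ [i], b ++ ["\t" ++ t ++ "\n"], pvCharLoop S1 i, pvCharLoop S2 ("\t" ++ t ++ "\n"))
      from by simp [pvAStep, hxs]]
    rw [ih hrest]
    rw [pvCharLoop_eq, pvCharLoop_eq]
    simp only [List.map_cons, hi, ht, pvChars, List.flatMap_cons, List.append_assoc,
      List.cons_append, List.nil_append, PySem.Set.update_append]

-- B's divide-and-conquer computes the same canonical result
lemma pv_seqs_B (L : List String)
    (h : ∀ line ∈ L, ((PySem.Str.split? line "\t").getD []).length = 2) :
    pvSeqs L =
      (L.map pvIn, L.map pvTar,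
       PySem.Set.ofList (pvChars (L.map pvIn)),
       PySem.Set.ofList (pvChars (L.map pvTar))) := by
  induction L using pvSeqs.induct with
  | case1 => simp [pvSeqs, pvChars]
  | case2 l i t hxs =>
    have := h l (by simp)
    have hi : pvIn l = i := by simp [pvIn, hxs]
    have ht : pvTar l = "\t" ++ t ++ "\n" := by simp [pvTar, hxs]
    simp [pvSeqs, hxs, hi, ht, pvChars]
  | case3 l hshape =>
    exfalso
    obtain ⟨i, t, hxs', -, -⟩ := split_two l (h l (by simp))
    exact hshape i t hxs' 
  | case4 a b rest chunk k ihL ihR =>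
    have hL : ∀ line ∈ (a :: b :: rest).take ((a :: b :: rest).length / 2),
        ((PySem.Str.split? line "\t").getD []).length = 2 :=
      fun line hm => h line (List.mem_of_mem_take hm)
    have hR : ∀ line ∈ (a :: b :: rest).drop ((a :: b :: rest).length / 2),
        ((PySem.Str.split? line "\t").getD []).length = 2 :=
      fun line hm => h line (List.mem_of_mem_drop hm)
    rw [show pvSeqs (a :: b :: rest) =
        (let k := (a :: b :: rest).length / 2
         let L := pvSeqs ((a :: b :: rest).take k)
         let R := pvSeqs ((a :: b :: rest).drop k)
         (L.1 ++ R.1, L.2.1 ++ R.2.1,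
          PySem.Set.union L.2.2.1 R.2.2.1, PySem.Set.union L.2.2.2 R.2.2.2))
      from by rw [pvSeqs]]
    simp only
    rw [ihL hL, ihR hR]
    simp only [union_ofList_ofList, ← pvChars_append, ← List.map_append,
      List.take_append_drop]
    rfl

-- ===== VERDICT (by name: the statement is the Claim_ definition above) =====
theorem create_start_end_seqs_spec : Claim_equal_create_start_end_seqs := by
  intro lines num_samples _hDom hPre
  unfold Spec_create_start_end_seqs create_start_end_seqs create_start_end_seqs_alt
  rw [pv_fold_A _ hPre, pv_seqs_B _ hPre]
  simp [PySem.Set.update_nil_left]
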